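-- pv_equiv track=rewrite | github.com/Zerekiel/EIP_PROJECT | chiffrement/chiffrement.py | addDelta
-- ===== SOURCE A (Python) =====
-- def addDelta(key):
--     delta = 0
--     top1X = 0
--     top1Y = 0
--     bottom1X = 0
--     bottom1Y = len(key) - 1
--     top2X = len(key[0]) - 1
--     top2Y = 0
--     bottom2X = len(key[0]) - 1
--     bottom2Y = len(key) - 1
--
--     for count in range(len(key) if len(key) < len(key[0]) else len(key[0])):
--         delta += (key[top1Y][top1X] + key[bottom1Y][bottom1X]) - (key[top2Y][top2X] + key[bottom2Y][bottom2X])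
--         top1Y += 1
--         top1X += 1
--         bottom1Y -= 1
--         bottom1X += 1
--         top2Y += 1
--         top2X -= 1
--         bottom2Y -= 1
--         bottom2X -= 1
--     return delta
-- ===== SOURCE B (Python) =====
-- def addDelta(key):
--     rows = len(key)
--     cols = len(key[0])
--     n = min(rows, cols)
--     delta = 0
--     for y, row in enumerate(key):
--         if y < n:
--             delta += row[y] - row[cols - 1 - y]
--         i = rows - 1 - y
--         if i < n:
--             delta += row[i] - row[cols - 1 - i]
--     return delta
-- ===== Notes on version B (the rewrite author's own statement) =====
-- stated objective: alternative
-- what changed: Replaces A's counter loop over min(rows,cols) iterations walking eight mutable diagonal pointers by a single structural pass over the row list (enumerate), where each row contributes its (at most four) diagonal cells via guards, so the matrix is traversed row by row instead of diagonal-position by diagonal-position.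
import Mathlib
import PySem

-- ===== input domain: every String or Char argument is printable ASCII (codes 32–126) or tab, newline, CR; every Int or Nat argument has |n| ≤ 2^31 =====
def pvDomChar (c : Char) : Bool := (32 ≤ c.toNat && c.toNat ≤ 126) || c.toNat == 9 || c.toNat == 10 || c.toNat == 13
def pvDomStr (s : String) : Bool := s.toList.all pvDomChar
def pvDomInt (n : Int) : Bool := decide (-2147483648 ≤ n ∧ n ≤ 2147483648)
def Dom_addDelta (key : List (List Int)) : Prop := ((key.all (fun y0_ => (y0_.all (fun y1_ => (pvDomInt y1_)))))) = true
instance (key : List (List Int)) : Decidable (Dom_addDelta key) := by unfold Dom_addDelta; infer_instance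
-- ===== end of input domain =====

-- B replaces A's counter loop walking eight mutable diagonal pointers by one structural
-- pass over the rows (enumerate), each row contributing its diagonal cells under guards
-- (alternative decomposition, same cost).

-- key[y][x]: Python raises IndexError out of range; Pre_ keeps every access in range,
-- so the defaults are never observed on admitted inputs.
def get2 (key : List (List Int)) (y x : Int) : Int :=
  PySem.List.pyGetD (PySem.List.pyGetD key y []) x 0

-- ===== PORT A =====
-- one loop body step over the nine mutable variables (delta, top1X, top1Y, bottom1X, bottom1Y, top2X, top2Y, bottom2X, bottom2Y)
def stepA (key : List (List Int)) :
    (Int × Int × Int × Int × Int × Int × Int × Int × Int) → Nat →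
    (Int × Int × Int × Int × Int × Int × Int × Int × Int)
  | (delta, t1x, t1y, b1x, b1y, t2x, t2y, b2x, b2y), _ =>
    (delta + ((get2 key t1y t1x + get2 key b1y b1x) - (get2 key t2y t2x + get2 key b2y b2x)),
     t1x + 1, t1y + 1, b1x + 1, b1y - 1, t2x - 1, t2y + 1, b2x - 1, b2y - 1)

def addDelta (key : List (List Int)) : Int :=
  let rows := key.length
  let cols := (key.headD []).length   -- len(key[0]); key = [] raises in Python, excluded by Pre_
  let n := if rows < cols then rows else cols
  ((List.range n).foldl (stepA key)
     (0, 0, 0, 0, (rows : Int) - 1, (cols : Int) - 1, 0, (cols : Int) - 1, (rows : Int) - 1)).1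

-- ===== PORT B =====
-- single pass over the rows: 'for y, row in enumerate(key)', two guarded '+=' per row
def addDelta_alt (key : List (List Int)) : Int :=
  let rows := key.length
  let cols := (key.headD []).length   -- len(key[0]); key = [] raises in Python, excluded by Pre_
  let n : Int := min rows cols
  (PySem.List.enumerate key 0).foldl (fun delta yr =>
      let y := yr.1
      let row := yr.2
      let d1 := if y < n then
          delta + (PySem.List.pyGetD row y 0 - PySem.List.pyGetD row ((cols : Int) - 1 - y) 0)
        else delta
      let i : Int := (rows : Int) - 1 - y
      if i < n then
        d1 + (PySem.List.pyGetD row i 0 - PySem.List.pyGetD row ((cols : Int) - 1 - i) 0)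
      else d1) 0

-- ===== PRECONDITION & SPEC =====
-- Pre_ excludes exactly the inputs where Python raises IndexError: the empty matrix (key[0])
-- and matrices where some touched diagonal cell lies beyond its (ragged) row.
def Pre_addDelta (key : List (List Int)) : Prop :=
  key ≠ [] ∧
  ∀ i < min key.length (key.headD []).length,
    max i ((key.headD []).length - 1 - i) < (key.getD i []).length ∧
    max i ((key.headD []).length - 1 - i) < (key.getD (key.length - 1 - i) []).length
instance (key : List (List Int)) : Decidable (Pre_addDelta key) := by
  unfold Pre_addDelta; infer_instance

def pvWitness_addDelta : List (List Int) := [[1, 2], [3, 4]]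

def Spec_addDelta (key : List (List Int)) (out : Int) : Prop := out = addDelta_alt key
instance (key : List (List Int)) (out : Int) : Decidable (Spec_addDelta key out) := by
  unfold Spec_addDelta; infer_instance

-- ===== CLAIM (what is proved, stated in full; the proofs are below) =====
def Claim_equal_addDelta : Prop :=
  ∀ (key : List (List Int)), Dom_addDelta key → Pre_addDelta key → Spec_addDelta key (addDelta key)

-- ===== LEMMAS AND PROOFS =====

-- the per-iteration contribution of A's loop, indices in closed form
def fTerm (key : List (List Int)) (R C : Int) (i : Nat) : Int :=
  (get2 key i i + get2 key (R - 1 - i) i) - (get2 key i (C - 1 - i) + get2 key (R - 1 - i) (C - 1 - i))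

-- invariant of A's loop: after k iterations the nine variables are affine in k
lemma loopA_state (key : List (List Int)) (R C : Int) (k : Nat) :
    (List.range k).foldl (stepA key) (0, 0, 0, 0, R - 1, C - 1, 0, C - 1, R - 1)
      = (((List.range k).map (fTerm key R C)).sum,
         (k : Int), (k : Int), (k : Int), R - 1 - k, C - 1 - k, (k : Int), C - 1 - k, R - 1 - k) := by
  induction k with
  | zero => simp
  | succ k ih =>
    rw [List.range_succ, List.foldl_append, ih, List.map_append, List.sum_append]
    simp only [List.foldl_cons, List.foldl_nil, stepA, List.map_cons, List.map_nil,
      List.sum_cons, List.sum_nil, fTerm, Prod.mk.injEq]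
    push_cast
    refine ⟨by ring, by ring, by ring, by ring, by ring, by ring, by ring, by ring, by ring⟩

-- B's per-row contribution (row y contributes under two guards)
def gTerm (key : List (List Int)) (R C n : Int) (y : Nat) : Int :=
  (if (y : Int) < n then get2 key y y - get2 key y (C - 1 - y) else 0)
  + (if R - 1 - (y : Int) < n then
       get2 key y (R - 1 - y) - get2 key y (C - 1 - (R - 1 - (y : Int))) else 0)

-- a fold that adds a (guarded) contribution per element is the sum of the contributions
lemma foldl_eq_add_sum {α : Type} (step : Int → α → Int) (h : α → Int)
    (hstep : ∀ a x, step a x = a + h x) :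
    ∀ (l : List α) (a : Int), l.foldl step a = a + (l.map h).sum := by
  intro l
  induction l with
  | nil => simp
  | cons x xs ih => intro a; simp [hstep, ih, add_assoc]

-- a sum of pointwise sums splits
lemma sum_map_split {α : Type} (l : List α) (f g : α → Int) :
    (l.map (fun x => f x + g x)).sum = (l.map f).sum + (l.map g).sum := by
  induction l with
  | nil => simp
  | cons x xs ih => simp only [List.map_cons, List.sum_cons, ih]; ring

-- B evaluates to the sum of the per-row contributions
lemma altB_eval (key : List (List Int)) :
    addDelta_alt key
      = ((List.range key.length).map
          (gTerm key key.length (key.headD []).length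
            ((min key.length (key.headD []).length : Nat) : Int))).sum := by
  simp only [addDelta_alt]
  simp only [← Nat.cast_min]
  refine Eq.trans (foldl_eq_add_sum _
    (fun yr : Int × List Int =>
      (if yr.1 < ((min key.length (key.headD []).length : Nat) : Int) then
          PySem.List.pyGetD yr.2 yr.1 0
            - PySem.List.pyGetD yr.2 (((key.headD []).length : Int) - 1 - yr.1) 0 else 0)
      + (if (key.length : Int) - 1 - yr.1 < ((min key.length (key.headD []).length : Nat) : Int) then
          PySem.List.pyGetD yr.2 ((key.length : Int) - 1 - yr.1) 0
            - PySem.List.pyGetD yr.2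
                (((key.headD []).length : Int) - 1 - ((key.length : Int) - 1 - yr.1)) 0 else 0))
    ?_ _ _) ?_
  · intro a x; dsimp only; split_ifs <;> ring
  · rw [PySem.List.enumerate_eq_map_pyRange key ([] : List Int), List.map_map,
      PySem.List.pyRange_one, List.map_map]
    simp only [zero_add, PySem.List.len_eq, sub_zero, Int.toNat_natCast]
    refine congrArg List.sum (List.map_congr_left ?_)
    intro y _
    simp only [Function.comp_apply, gTerm, get2]

-- truncation: a guarded sum over range m equals the sum over range n when n ≤ m
lemma sum_range_trunc (f : Nat → Int) (n : Nat) :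
    ∀ m, n ≤ m →
      ((List.range m).map (fun (y : Nat) => if (y : Int) < (n : Int) then f y else 0)).sum
        = ((List.range n).map f).sum := by
  intro m
  induction m with
  | zero => intro h; interval_cases n; simp
  | succ m ih =>
    intro h
    rcases Nat.lt_or_ge n (m + 1) with h' | h'
    · rw [List.range_succ, List.map_append, List.sum_append, ih (by omega)]
      have hm : ¬ ((m : Int) < (n : Int)) := by exact_mod_cast Nat.not_lt.mpr (by omega)
      simp only [List.map_cons, List.map_nil, List.sum_cons, List.sum_nil, if_neg hm, add_zero]
    · have hn : n = m + 1 := by omega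
      subst hn
      congr 1
      refine List.map_congr_left ?_
      intro y hy
      have hy' : (y : Int) < ((m + 1 : Nat) : Int) := by
        exact_mod_cast List.mem_range.mp hy
      rw [if_pos hy']

-- bridge list sums over range to Finset.range sums (to use sum_range_reflect)
lemma listsum_range (f : Nat → Int) (m : Nat) :
    ((List.range m).map f).sum = ∑ i ∈ Finset.range m, f i := by
  induction m with
  | zero => simp
  | succ m ih => rw [List.range_succ, List.map_append, List.sum_append,
      Finset.sum_range_succ, ih]; simp

-- ===== VERDICT (by name: the statement is the Claim_ definition above) =====
theorem addDelta_spec : Claim_equal_addDelta := by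
  intro key _ _
  unfold Spec_addDelta
  rw [altB_eval]
  simp only [addDelta]
  have hif : (if key.length < (key.headD []).length then key.length else (key.headD []).length)
      = min key.length (key.headD []).length := by
    rw [Nat.min_def]; split_ifs <;> omega
  rw [hif, loopA_state]
  set R := key.length with hR
  set C := (key.headD []).length with hC
  set n := min R C with hnn
  have hnR : n ≤ R := Nat.min_le_left _ _
  unfold gTerm
  rw [sum_map_split, sum_range_trunc _ n R hnR]
  have hrefl :
      ((List.range R).map (fun (y : Nat) => if (R : Int) - 1 - (y : Int) < (n : Int) then
          get2 key y ((R : Int) - 1 - (y : Int))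
            - get2 key y ((C : Int) - 1 - ((R : Int) - 1 - (y : Int))) else 0)).sum
        = ((List.range R).map (fun (y : Nat) => if (y : Int) < (n : Int) then
            get2 key ((R : Int) - 1 - (y : Int)) y
              - get2 key ((R : Int) - 1 - (y : Int)) ((C : Int) - 1 - (y : Int)) else 0)).sum := by
    rw [listsum_range, listsum_range, ← Finset.sum_range_reflect]
    refine Finset.sum_congr rfl ?_
    intro y hy
    have hyR : y < R := Finset.mem_range.mp hy
    have h1 : ((R - 1 - y : Nat) : Int) = (R : Int) - 1 - (y : Int) := by omega
    have h2 : (R : Int) - 1 - ((R : Int) - 1 - (y : Int)) = (y : Int) := by ring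
    rw [h1, h2]
  rw [hrefl, sum_range_trunc _ n R hnR, ← sum_map_split]
  refine congrArg List.sum (List.map_congr_left ?_)
  intro i _
  simp only [fTerm]
  ring
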